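-- pv_equiv track=rewrite | github.com/x3asarc/vektal | src/assistant/session_primer.py | _infer_impact_area
-- ===== SOURCE A (Python) =====
-- def _infer_impact_area(files: list[str]) -> str:
--     normalized = [str(path).lower() for path in files]
--     if any("graph" in path for path in normalized):
--         return "graph"
--     if any("/api/" in path or path.startswith("api/") for path in normalized):
--         return "api"
--     if any("model" in path for path in normalized):
--         return "database"
--     if any("governance" in path for path in normalized):
--         return "governance"
--     return "core"
-- ===== SOURCE B (Python) =====
-- def _infer_impact_area(files: list[str]) -> str:
--     matched = set()
--     for path in files:
--         p = str(path).lower()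
--         if "graph" in p:
--             matched.add("graph")
--         if "/api/" in p or p.startswith("api/"):
--             matched.add("api")
--         if "model" in p:
--             matched.add("database")
--         if "governance" in p:
--             matched.add("governance")
--     for category in ("graph", "api", "database", "governance"):
--         if category in matched:
--             return category
--     return "core"
-- ===== Notes on version B (the rewrite author's own statement) =====
-- stated objective: alternative
-- what changed: Replaces four independent short-circuit any-scans over the file list with a single classification pass that collects matched categories into a set, followed by a fixed-priority resolution over that set.
import Mathlib
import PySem

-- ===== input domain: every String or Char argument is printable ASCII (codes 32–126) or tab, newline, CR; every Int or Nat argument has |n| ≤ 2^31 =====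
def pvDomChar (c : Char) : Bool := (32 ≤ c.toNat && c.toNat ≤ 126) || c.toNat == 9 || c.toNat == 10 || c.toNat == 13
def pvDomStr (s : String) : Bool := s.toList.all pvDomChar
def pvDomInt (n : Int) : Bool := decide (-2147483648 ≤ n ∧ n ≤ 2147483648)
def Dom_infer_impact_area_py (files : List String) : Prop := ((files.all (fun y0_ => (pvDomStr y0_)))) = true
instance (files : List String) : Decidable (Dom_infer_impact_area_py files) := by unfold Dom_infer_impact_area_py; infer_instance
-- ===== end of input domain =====

-- B replaces A's four independent short-circuit scans by one classification pass that
-- collects matched categories into a set, then resolves them in a fixed priority order.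

-- ===== PORT A =====
def infer_impact_area_py (files : List String) : String :=
  let normalized := files.map (fun path => PySem.Str.lower path)
  if normalized.any (fun p => PySem.Str.isIn "graph" p) then "graph"
  else if normalized.any (fun p => PySem.Str.isIn "/api/" p || PySem.Str.startswith p "api/") then "api"
  else if normalized.any (fun p => PySem.Str.isIn "model" p) then "database"
  else if normalized.any (fun p => PySem.Str.isIn "governance" p) then "governance"
  else "core"

-- ===== PORT B =====
-- one loop iteration of B: classify one path into the matched-category set
def pvStep (s : PySem.Set String) (path : String) : PySem.Set String :=
  let p := PySem.Str.lower path
  let s1 := if PySem.Str.isIn "graph" p then PySem.Set.add s "graph" else s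
  let s2 := if PySem.Str.isIn "/api/" p || PySem.Str.startswith p "api/" then PySem.Set.add s1 "api" else s1
  let s3 := if PySem.Str.isIn "model" p then PySem.Set.add s2 "database" else s2
  if PySem.Str.isIn "governance" p then PySem.Set.add s3 "governance" else s3

def infer_impact_area_py_alt (files : List String) : String :=
  let matched := files.foldl pvStep PySem.Set.empty
  match ["graph", "api", "database", "governance"].find? (fun c => PySem.Set.contains matched c) with
  | some c => c
  | none => "core"

-- ===== PRECONDITION & SPEC =====
def Spec_infer_impact_area_py (files : List String) (out : String) : Prop := out = infer_impact_area_py_alt files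
instance (files : List String) (out : String) : Decidable (Spec_infer_impact_area_py files out) := by unfold Spec_infer_impact_area_py; infer_instance

-- ===== CLAIM (what is proved, stated in full; the proofs are below) =====
def Claim_equal_infer_impact_area_py : Prop := ∀ (files : List String), Dom_infer_impact_area_py files → Spec_infer_impact_area_py files (infer_impact_area_py files)

-- ===== LEMMAS AND PROOFS =====

theorem pv_step_graph (s : PySem.Set String) (p : String) :
    PySem.Set.contains (pvStep s p) "graph"
      = (PySem.Set.contains s "graph" || PySem.Str.isIn "graph" (PySem.Str.lower p)) := by
  simp only [pvStep]; split_ifs <;> simp_all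

theorem pv_step_api (s : PySem.Set String) (p : String) :
    PySem.Set.contains (pvStep s p) "api"
      = (PySem.Set.contains s "api" ||
          (PySem.Str.isIn "/api/" (PySem.Str.lower p) || PySem.Str.startswith (PySem.Str.lower p) "api/")) := by
  simp only [pvStep]; split_ifs <;> simp_all

theorem pv_step_database (s : PySem.Set String) (p : String) :
    PySem.Set.contains (pvStep s p) "database"
      = (PySem.Set.contains s "database" || PySem.Str.isIn "model" (PySem.Str.lower p)) := by
  simp only [pvStep]; split_ifs <;> simp_all

theorem pv_step_governance (s : PySem.Set String) (p : String) :
    PySem.Set.contains (pvStep s p) "governance"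
      = (PySem.Set.contains s "governance" || PySem.Str.isIn "governance" (PySem.Str.lower p)) := by
  simp only [pvStep]; split_ifs <;> simp_all

theorem pv_foldl_graph (files : List String) (s : PySem.Set String) :
    PySem.Set.contains (files.foldl pvStep s) "graph"
      = (PySem.Set.contains s "graph" || files.any (fun p => PySem.Str.isIn "graph" (PySem.Str.lower p))) := by
  induction files generalizing s with
  | nil => simp
  | cons h t ih => rw [List.foldl_cons, ih, pv_step_graph]; simp [Bool.or_assoc]

theorem pv_foldl_api (files : List String) (s : PySem.Set String) :
    PySem.Set.contains (files.foldl pvStep s) "api"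
      = (PySem.Set.contains s "api" ||
          files.any (fun p => PySem.Str.isIn "/api/" (PySem.Str.lower p) || PySem.Str.startswith (PySem.Str.lower p) "api/")) := by
  induction files generalizing s with
  | nil => simp
  | cons h t ih => rw [List.foldl_cons, ih, pv_step_api]; simp [Bool.or_assoc]

theorem pv_foldl_database (files : List String) (s : PySem.Set String) :
    PySem.Set.contains (files.foldl pvStep s) "database"
      = (PySem.Set.contains s "database" || files.any (fun p => PySem.Str.isIn "model" (PySem.Str.lower p))) := by
  induction files generalizing s with
  | nil => simp
  | cons h t ih => rw [List.foldl_cons, ih, pv_step_database]; simp [Bool.or_assoc]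

theorem pv_foldl_governance (files : List String) (s : PySem.Set String) :
    PySem.Set.contains (files.foldl pvStep s) "governance"
      = (PySem.Set.contains s "governance" || files.any (fun p => PySem.Str.isIn "governance" (PySem.Str.lower p))) := by
  induction files generalizing s with
  | nil => simp
  | cons h t ih => rw [List.foldl_cons, ih, pv_step_governance]; simp [Bool.or_assoc]

-- ===== VERDICT (by name: the statement is the Claim_ definition above) =====
theorem pv_contains_empty (x : String) : PySem.Set.contains PySem.Set.empty x = false := rfl

theorem infer_impact_area_py_spec : Claim_equal_infer_impact_area_py := by
  intro files _
  unfold Spec_infer_impact_area_py infer_impact_area_py infer_impact_area_py_alt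
  simp only [List.find?, pv_foldl_graph, pv_foldl_api, pv_foldl_database, pv_foldl_governance,
    pv_contains_empty, Bool.false_or, List.any_map, Function.comp_def]
  cases hg : files.any (fun p => PySem.Str.isIn "graph" (PySem.Str.lower p)) <;>
  cases ha : files.any (fun p => PySem.Str.isIn "/api/" (PySem.Str.lower p) || PySem.Str.startswith (PySem.Str.lower p) "api/") <;>
  cases hd : files.any (fun p => PySem.Str.isIn "model" (PySem.Str.lower p)) <;>
  cases hv : files.any (fun p => PySem.Str.isIn "governance" (PySem.Str.lower p)) <;>
  simp
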